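-- pv_equiv track=rewrite | github.com/JiHaeK/Algorithm | p1065.py | solve
-- ===== SOURCE A (Python) =====
-- def solve(i) :
-- 	count=0
-- 	for i in range(1, i+1) :
-- 		if(i<100) :
-- 			count+=1
-- 		elif(i<1000) :
-- 			n100, n10, n1=str(i)[0], str(i)[1], str(i)[2]
-- 			n100, n10, n1=int(n100), int(n10), int(n1)
-- 			if n100-n10==n10-n1 :
-- 				count+=1
-- 		else :
-- 			pass
-- 	return count
-- ===== SOURCE B (Python) =====
-- def solve(i):
--     # closed count for 1..99, plus direct enumeration of valid 3-digit numbers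
--     total = max(0, min(i, 99))
--     m = min(i, 999)
--     for a in range(1, 10):
--         for b in range(0, 10):
--             c = 2 * b - a
--             if 0 <= c <= 9:
--                 num = 100 * a + 10 * b + c
--                 if num <= m:
--                     total += 1
--     return total
-- ===== Notes on version B (the rewrite author's own statement) =====
-- stated objective: faster
-- what changed: Replaced the full 1..i scan with string digit-splitting by a closed-form count for the band below one hundred plus direct enumeration of the valid three-digit numbers from their digit structure (units digit forced by the arithmetic condition), clamped to the three-digit ceiling.
import Mathlib
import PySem

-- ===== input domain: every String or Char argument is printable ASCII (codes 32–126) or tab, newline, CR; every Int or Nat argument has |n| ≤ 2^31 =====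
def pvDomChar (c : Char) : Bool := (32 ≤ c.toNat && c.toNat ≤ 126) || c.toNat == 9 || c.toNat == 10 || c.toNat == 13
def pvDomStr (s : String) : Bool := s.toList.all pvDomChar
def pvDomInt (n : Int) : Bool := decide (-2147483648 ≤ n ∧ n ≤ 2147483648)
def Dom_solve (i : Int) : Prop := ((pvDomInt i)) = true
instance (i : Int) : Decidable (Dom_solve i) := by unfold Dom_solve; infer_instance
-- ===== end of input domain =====

-- B replaces A's linear scan with string digit extraction by a closed form for 1..99
-- plus direct enumeration of the valid 3-digit numbers; equal return values proved below.

-- ===== PORT A =====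
-- str(n)[k] then int(...); in A's loop this branch only runs for 100 <= n <= 999,
-- where the index is in range and the char parses, so the .getD 0 defaults never fire.
def solveDigit (n : Int) (k : Int) : Int :=
  ((PySem.Str.pyGet? (PySem.Int.toStr n) k).bind (fun c => PySem.Int.ofStr? (String.ofList [c]))).getD 0

def solveStep (count : Int) (n : Int) : Int :=
  if n < 100 then count + 1
  else if n < 1000 then
    let n100 := solveDigit n 0
    let n10  := solveDigit n 1
    let n1   := solveDigit n 2
    if n100 - n10 = n10 - n1 then count + 1 else count
  else count

def solve (i : Int) : Int :=
  (PySem.List.pyRange 1 (i + 1) 1).foldl solveStep 0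

-- ===== PORT B =====
def solveAltInner (m : Int) (a : Int) (t : Int) (b : Int) : Int :=
  let c := 2 * b - a
  if 0 ≤ c ∧ c ≤ 9 then
    (if 100 * a + 10 * b + c ≤ m then t + 1 else t)
  else t

def solve_alt (i : Int) : Int :=
  let total := max 0 (min i 99)
  let m := min i 999
  (PySem.List.pyRange 1 10 1).foldl (fun t a =>
    (PySem.List.pyRange 0 10 1).foldl (solveAltInner m a) t) total

-- ===== PRECONDITION & SPEC =====
def Spec_solve (i : Int) (out : Int) : Prop := out = solve_alt i
instance (i : Int) (out : Int) : Decidable (Spec_solve i out) := by unfold Spec_solve; infer_instance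

-- ===== CLAIM (what is proved, stated in full; the proofs are below) =====
def Claim_equal_solve : Prop := ∀ (i : Int), Dom_solve i → Spec_solve i (solve i)

-- ===== LEMMAS AND PROOFS =====

-- A's digit condition, and the same condition read off arithmetically
def strCond (n : Int) : Bool :=
  decide (solveDigit n 0 - solveDigit n 1 = solveDigit n 1 - solveDigit n 2)

def arithCond (n : Int) : Bool :=
  PySem.Int.floordiv n 100 - PySem.Int.mod (PySem.Int.floordiv n 10) 10
    == PySem.Int.mod (PySem.Int.floordiv n 10) 10 - PySem.Int.mod n 10

def mStep (count : Int) (n : Int) : Int :=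
  if n < 100 then count + 1
  else if n < 1000 then (if arithCond n then count + 1 else count)
  else count

def sArith (i : Int) : Int := (PySem.List.pyRange 1 (i + 1) 1).foldl mStep 0

set_option maxRecDepth 100000 in
set_option maxHeartbeats 1000000 in
lemma cond_eq :
    ((PySem.List.pyRange 100 1000 1).all (fun n => strCond n == arithCond n)) = true := by
  decide

lemma step_eq (c n : Int) : solveStep c n = mStep c n := by
  unfold solveStep mStep
  by_cases h1 : n < 100
  · simp [h1]
  · by_cases h2 : n < 1000
    · have hmem : n ∈ PySem.List.pyRange 100 1000 1 :=
        (PySem.List.mem_pyRange_one).2 ⟨by omega, h2⟩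
      have hc : strCond n = arithCond n :=
        eq_of_beq (List.all_eq_true.1 cond_eq n hmem)
      unfold strCond at hc
      simp only [h1, h2, if_false]
      by_cases hP : solveDigit n 0 - solveDigit n 1 = solveDigit n 1 - solveDigit n 2
      · simp [hP] at hc ⊢; rw [← hc]
      · simp [hP] at hc ⊢; rw [← hc]
    · simp [h1, h2]

lemma solve_eq_sArith (i : Int) : solve i = sArith i := by
  unfold solve sArith
  rw [show solveStep = mStep from funext fun c => funext fun n => step_eq c n]

-- cumulative checker: carries the running count (= sArith so far) and verifies it
-- against solve_alt at every step, so the whole band 1..999 is checked in one pass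
def chkStep (p : Int × Bool) (n : Int) : Int × Bool :=
  (mStep p.1 n, p.2 && (mStep p.1 n == solve_alt n))

set_option maxRecDepth 100000 in
set_option maxHeartbeats 4000000 in
lemma chk_true : ((PySem.List.pyRange 1 1000 1).foldl chkStep (0, true)).2 = true := by
  decide

lemma chk_fst (l : List Int) (t : Int) (b : Bool) :
    (l.foldl chkStep (t, b)).1 = l.foldl mStep t := by
  induction l generalizing t b with
  | nil => rfl
  | cons x xs ih => simp only [List.foldl_cons, chkStep]; exact ih _ _

lemma chk_mono (l : List Int) (t : Int) :
    (l.foldl chkStep (t, false)).2 = false := by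
  induction l generalizing t with
  | nil => rfl
  | cons x xs ih => simp only [List.foldl_cons, chkStep, Bool.false_and]; exact ih _

lemma sArith_eq_alt_small {j : Int} (h1 : 1 ≤ j) (h2 : j ≤ 999) :
    sArith j = solve_alt j := by
  have hsplit1 : PySem.List.pyRange 1 1000 1
      = PySem.List.pyRange 1 (j + 1) 1 ++ PySem.List.pyRange (j + 1) 1000 1 :=
    PySem.List.pyRange_one_append 1 (j + 1) 1000 (by omega) (by omega)
  have hsplit2 : PySem.List.pyRange 1 (j + 1) 1 = PySem.List.pyRange 1 j 1 ++ [j] :=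
    PySem.List.pyRange_one_succ_right (show (1:Int) ≤ j by omega)
  set q := (PySem.List.pyRange 1 j 1).foldl chkStep (0, true) with hq
  have hstep : (PySem.List.pyRange 1 (j + 1) 1).foldl chkStep (0, true) = chkStep q j := by
    rw [hsplit2, List.foldl_append]; rfl
  have hfin : ((PySem.List.pyRange 1 1000 1).foldl chkStep (0, true)).2
      = ((PySem.List.pyRange (j + 1) 1000 1).foldl chkStep (chkStep q j)).2 := by
    rw [hsplit1, List.foldl_append, hstep]
  have hchk : (chkStep q j).2 = true := by
    by_contra hne
    have h2' : (chkStep q j).2 = false := by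
      cases hb : (chkStep q j).2 <;> simp_all
    have : ((PySem.List.pyRange (j + 1) 1000 1).foldl chkStep (chkStep q j)).2 = false := by
      rw [show chkStep q j = ((chkStep q j).1, false) by
        rw [← h2']]
      exact chk_mono _ _
    rw [chk_true] at hfin
    rw [this] at hfin
    exact Bool.true_eq_false.mp hfin
  have hval : mStep q.1 j == solve_alt j := by
    simp only [chkStep, Bool.and_eq_true] at hchk
    exact hchk.2
  have hfold : sArith j = mStep q.1 j := by
    unfold sArith
    rw [hsplit2, List.foldl_append, hq, chk_fst]
    rfl
  rw [hfold]
  exact eq_of_beq hval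

lemma mStep_const {l : List Int} (hl : ∀ n ∈ l, (1000 : Int) ≤ n) (t : Int) :
    l.foldl mStep t = t := by
  induction l generalizing t with
  | nil => rfl
  | cons x xs ih =>
    have hx := hl x (by simp)
    simp only [List.foldl_cons]
    rw [show mStep t x = t by
      unfold mStep; rw [if_neg (by omega), if_neg (by omega)]]
    exact ih (fun n hn => hl n (by simp [hn])) t

lemma solveAltInner_const {m : Int} (hm : m < 100) {a : Int} (ha : 1 ≤ a)
    {l : List Int} (hl : ∀ b ∈ l, (0 : Int) ≤ b) (t : Int) :
    l.foldl (solveAltInner m a) t = t := by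
  induction l generalizing t with
  | nil => rfl
  | cons x xs ih =>
    have hx := hl x (by simp)
    simp only [List.foldl_cons]
    rw [show solveAltInner m a t x
        = (if 0 ≤ 2 * x - a ∧ 2 * x - a ≤ 9 then
            (if 100 * a + 10 * x + (2 * x - a) ≤ m then t + 1 else t) else t) from rfl]
    rw [show (if 0 ≤ 2 * x - a ∧ 2 * x - a ≤ 9 then
            (if 100 * a + 10 * x + (2 * x - a) ≤ m then t + 1 else t) else t) = t by
      split_ifs <;> omega]
    exact ih (fun b hb => hl b (by simp [hb])) t

lemma solve_alt_def (i : Int) :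
    solve_alt i = (PySem.List.pyRange 1 10 1).foldl (fun t a =>
      (PySem.List.pyRange 0 10 1).foldl (solveAltInner (min i 999) a) t) (max 0 (min i 99)) := rfl

lemma solveAltOuter_const {m : Int} (hm : m < 100) {l : List Int}
    (hl : ∀ a ∈ l, (1 : Int) ≤ a) (t : Int) :
    l.foldl (fun t a => (PySem.List.pyRange 0 10 1).foldl (solveAltInner m a) t) t = t := by
  induction l generalizing t with
  | nil => rfl
  | cons x xs ih =>
    have hB : ∀ b ∈ PySem.List.pyRange 0 10 1, (0 : Int) ≤ b := by decide
    simp only [List.foldl_cons]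
    rw [solveAltInner_const hm (hl x (by simp)) hB t]
    exact ih (fun a ha => hl a (by simp [ha])) t

lemma solve_alt_nonpos {i : Int} (hi : i ≤ 0) : solve_alt i = 0 := by
  have h0 : max 0 (min i 99) = 0 := by omega
  have hRange : ∀ a ∈ PySem.List.pyRange 1 10 1, (1 : Int) ≤ a := by decide
  rw [solve_alt_def, h0]
  exact solveAltOuter_const (by omega) hRange 0

lemma solve_alt_sat {i : Int} (hi : 1000 ≤ i) : solve_alt i = solve_alt 999 := by
  rw [solve_alt_def, solve_alt_def,
    show min i 99 = min (999 : Int) 99 by omega, show min i 999 = min (999 : Int) 999 by omega]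

-- ===== VERDICT (by name: the statement is the Claim_ definition above) =====
theorem solve_spec : Claim_equal_solve := by
  intro i _
  unfold Spec_solve
  rw [solve_eq_sArith]
  have small : ∀ j : Int, 1 ≤ j → j ≤ 999 → sArith j = solve_alt j :=
    fun j h1 h2 => sArith_eq_alt_small h1 h2
  rcases lt_trichotomy i 0 with hneg | hzero | hpos
  · have hempty : PySem.List.pyRange 1 (i + 1) 1 = [] :=
      PySem.List.pyRange_one_eq_nil (by omega)
    rw [solve_alt_nonpos (by omega)]
    unfold sArith
    rw [hempty]; rfl
  · subst hzero
    rw [solve_alt_nonpos le_rfl]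
    unfold sArith
    rw [PySem.List.pyRange_one_eq_nil (by omega)]; rfl
  · by_cases hbig : i < 1000
    · exact small i (by omega) (by omega)
    · rw [not_lt] at hbig
      have hsplit := PySem.List.pyRange_one_append 1 1000 (i + 1) (by omega) (by omega)
      have htail : ∀ n ∈ PySem.List.pyRange 1000 (i + 1) 1, (1000 : Int) ≤ n := by
        intro n hn; exact ((PySem.List.mem_pyRange_one).1 hn).1
      calc sArith i = (PySem.List.pyRange 1 1000 1).foldl mStep 0 := by
            unfold sArith; rw [hsplit, List.foldl_append, mStep_const htail]
        _ = sArith 999 := rfl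
        _ = solve_alt 999 := small 999 (by norm_num) (by norm_num)
        _ = solve_alt i := (solve_alt_sat hbig).symm
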